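-- pv_equiv track=rewrite | github.com/GautierBlandin/leetcode | medium/longest_palindromic_substring.py | find_longest_odd_length_palindrome
-- ===== SOURCE A (Python) =====
-- def find_longest_odd_length_palindrome(s, start_index):
--     """
--     Find the longest odd length palindrome centered on start_index
--
--     Args:
--         s: The string to search
--         start_index: The index on which the palindrome is centered
--
--     Returns:
--         The length of the palindrome
--     """
--     palindrome_length = 1
--     palindrome = s[start_index]
--     increment = 1
--     n = len(s)
--     while start_index - increment >= 0 and start_index + increment < n:
--         if s[start_index - increment] == s[start_index + increment]:
--             palindrome_length += 2
--             palindrome = s[start_index - increment] + palindrome + s[start_index + increment]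
--             increment += 1
--         else:
--             break
--     return palindrome_length, palindrome
-- ===== SOURCE B (Python) =====
-- def find_longest_odd_length_palindrome(s, start_index):
--     center = s[start_index]
--     n = len(s)
--     left = []
--     i = start_index - 1
--     while i >= 0:
--         left.append(s[i])
--         i -= 1
--     right = []
--     i = start_index + 1
--     while i < n:
--         right.append(s[i])
--         i += 1
--     r = 0
--     for lc, rc in zip(left, right):
--         if lc != rc:
--             break
--         r += 1
--     return 2 * r + 1, ''.join(reversed(left[:r])) + center + ''.join(right[:r])
-- ===== Notes on version B (the rewrite author's own statement) =====
-- stated objective: alternative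
-- what changed: Instead of expanding symmetrically in one while-loop that grows the palindrome string as it compares, B first collects the whole left arm (reversed) and right arm as character lists, takes the length of their common prefix, and reconstructs the answer from the first r characters of each arm.
import Mathlib
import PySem

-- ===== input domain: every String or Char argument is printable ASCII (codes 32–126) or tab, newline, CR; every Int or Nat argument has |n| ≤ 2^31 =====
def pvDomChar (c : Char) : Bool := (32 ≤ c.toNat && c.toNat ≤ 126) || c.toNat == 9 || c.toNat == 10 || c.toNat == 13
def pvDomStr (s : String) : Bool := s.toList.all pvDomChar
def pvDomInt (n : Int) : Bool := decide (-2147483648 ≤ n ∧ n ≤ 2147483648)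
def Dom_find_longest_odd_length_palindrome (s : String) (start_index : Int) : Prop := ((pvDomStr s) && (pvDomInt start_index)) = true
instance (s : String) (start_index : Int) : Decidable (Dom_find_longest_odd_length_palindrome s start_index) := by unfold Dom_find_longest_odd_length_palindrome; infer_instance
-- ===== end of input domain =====

-- B collects the left arm (reversed) and right arm as char lists, takes their common-prefix
-- length, and rebuilds the answer from the first r chars of each arm; same O(n) cost,
-- different decomposition than A's single expanding while-loop ("alternative").


-- ===== PORT A =====
-- A's while-loop: state (increment, palindrome_length, palindrome); fuel = len(s) bounds the
-- iteration count (the loop runs at most len(s) times), it does not change any value.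
def pvALoop (cs : List Char) (si : Int) (fuel : Nat) (inc plen : Int) (pal : List Char) :
    Int × List Char :=
  match fuel with
  | 0 => (plen, pal)
  | fuel + 1 =>
    if 0 ≤ si - inc ∧ si + inc < (cs.length : Int) then
      match PySem.List.pyGet? cs (si - inc), PySem.List.pyGet? cs (si + inc) with
      | some l, some r =>
        if l = r then pvALoop cs si fuel (inc + 1) (plen + 2) (l :: pal ++ [r])
        else (plen, pal)
      | _, _ => (plen, pal)   -- unreachable: indices are in range under the guard
    else (plen, pal)

def find_longest_odd_length_palindrome (s : String) (start_index : Int) : Int × String :=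
  let cs := s.toList
  match PySem.List.pyGet? cs start_index with
  | none => (0, "")          -- IndexError: excluded by Pre_
  | some c =>
    let res := pvALoop cs start_index cs.length 1 1 [c]
    (res.1, String.mk res.2)

-- ===== PORT B =====
-- left arm: chars at start_index-1, start_index-2, … while the index is ≥ 0
def pvBLeft (cs : List Char) (i : Int) : List Char :=
  if _h : 0 ≤ i then
    (match PySem.List.pyGet? cs i with | some c => c | none => ' ') :: pvBLeft cs (i - 1)
  else []
termination_by (i + 1).toNat
decreasing_by omega

-- right arm: chars at start_index+1, start_index+2, … while the index is < len(s)
def pvBRight (cs : List Char) (i : Int) : List Char :=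
  if _h : i < (cs.length : Int) then
    (match PySem.List.pyGet? cs i with | some c => c | none => ' ') :: pvBRight cs (i + 1)
  else []
termination_by ((cs.length : Int) - i).toNat
decreasing_by omega

-- length of the common prefix of the two arms (the zip-and-break loop of Source B)
def pvPrefLen : List Char → List Char → Nat
  | a :: as_, b :: bs => if a = b then pvPrefLen as_ bs + 1 else 0
  | _, _ => 0

def find_longest_odd_length_palindrome_alt (s : String) (start_index : Int) : Int × String :=
  let cs := s.toList
  match PySem.List.pyGet? cs start_index with
  | none => (0, "")          -- IndexError: excluded by Pre_
  | some c =>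
    let left := pvBLeft cs (start_index - 1)
    let right := pvBRight cs (start_index + 1)
    let r := pvPrefLen left right
    (2 * (r : Int) + 1, String.mk ((left.take r).reverse ++ c :: right.take r))

-- ===== PRECONDITION & SPEC =====
-- Pre_ excludes exactly the inputs where Python's s[start_index] raises IndexError
-- (start_index outside [-len(s), len(s)-1]); both A and B raise there.
def Pre_find_longest_odd_length_palindrome (s : String) (start_index : Int) : Prop :=
  -(s.toList.length : Int) ≤ start_index ∧ start_index < (s.toList.length : Int)
instance (s : String) (start_index : Int) : Decidable (Pre_find_longest_odd_length_palindrome s start_index) := by unfold Pre_find_longest_odd_length_palindrome; infer_instance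

def pvWitness_find_longest_odd_length_palindrome : String × Int := ("abcba", 2)

def Spec_find_longest_odd_length_palindrome (s : String) (start_index : Int) (out : Int × String) : Prop := out = find_longest_odd_length_palindrome_alt s start_index
instance (s : String) (start_index : Int) (out : Int × String) : Decidable (Spec_find_longest_odd_length_palindrome s start_index out) := by unfold Spec_find_longest_odd_length_palindrome; infer_instance

-- ===== CLAIM (what is proved, stated in full; the proofs are below) =====
def Claim_equal_find_longest_odd_length_palindrome : Prop := ∀ (s : String) (start_index : Int), Dom_find_longest_odd_length_palindrome s start_index → Pre_find_longest_odd_length_palindrome s start_index → Spec_find_longest_odd_length_palindrome s start_index (find_longest_odd_length_palindrome s start_index)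

-- ===== LEMMAS AND PROOFS =====

lemma pvPrefLen_left_nil (ys : List Char) : pvPrefLen [] ys = 0 := by cases ys <;> rfl
lemma pvPrefLen_right_nil (xs : List Char) : pvPrefLen xs [] = 0 := by cases xs <;> rfl

-- the left arm is the reversed prefix of cs before index k
lemma pvBLeft_eq (cs : List Char) : ∀ (k : Nat), k ≤ cs.length →
    pvBLeft cs ((k : Int) - 1) = (cs.take k).reverse := by
  intro k
  induction k with
  | zero => intro _; rw [pvBLeft]; simp
  | succ k ih =>
    intro hk
    rw [pvBLeft]
    have hk' : k < cs.length := by omega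
    have : ((k + 1 : Nat) : Int) - 1 = (k : Int) := by push_cast; ring
    rw [this]
    simp only [show (0:Int) ≤ (k:Int) by positivity, if_pos, dif_pos]
    rw [PySem.List.pyGet?_natCast]
    simp only [List.getElem?_eq_getElem hk']
    rw [ih (by omega), List.take_succ, List.reverse_append]
    simp [List.getElem?_eq_getElem hk']

-- the right arm is the suffix of cs from index k
lemma pvBRight_eq (cs : List Char) : ∀ (d k : Nat), cs.length - k ≤ d →
    pvBRight cs (k : Int) = cs.drop k := by
  intro d
  induction d with
  | zero =>
    intro k hk
    have hlen : cs.length ≤ k := by omega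
    rw [pvBRight, dif_neg (show ¬ ((k:Int) < (cs.length : Int)) by omega)]
    exact (List.drop_eq_nil_iff.mpr hlen).symm
  | succ d ih =>
    intro k hk
    rw [pvBRight]
    by_cases h : (k:Int) < (cs.length : Int)
    · have hk' : k < cs.length := by omega
      simp only [dif_pos h]
      rw [PySem.List.pyGet?_natCast]
      simp only [List.getElem?_eq_getElem hk']
      have : (k:Int) + 1 = ((k+1 : Nat) : Int) := by push_cast; ring
      rw [this, ih (k+1) (by omega)]
      exact (List.drop_eq_getElem_cons hk').symm
    · have hlen : cs.length ≤ k := by omega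
      rw [dif_neg h]
      exact (List.drop_eq_nil_iff.mpr hlen).symm

-- A's loop computes plen + 2r and wraps pal with the r matched chars from the dropped arms
lemma pvALoop_eq (cs : List Char) (j : Nat) (hj : j < cs.length) :
    ∀ (fuel k : Nat) (plen : Int) (pal : List Char),
      min j (cs.length - j - 1) ≤ k + fuel →
      pvALoop cs (j : Int) fuel ((k : Int) + 1) plen pal =
        (plen + 2 * (pvPrefLen (((cs.take j).reverse).drop k) ((cs.drop (j+1)).drop k) : Int),
         ((((cs.take j).reverse).drop k).take
             (pvPrefLen (((cs.take j).reverse).drop k) ((cs.drop (j+1)).drop k))).reverse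
           ++ pal ++
           ((cs.drop (j+1)).drop k).take
             (pvPrefLen (((cs.take j).reverse).drop k) ((cs.drop (j+1)).drop k))) := by
  intro fuel
  have hLlen : ((cs.take j).reverse).length = j := by simp [Nat.min_eq_left (le_of_lt hj)]
  have hRlen : (cs.drop (j+1)).length = cs.length - (j+1) := by simp
  induction fuel with
  | zero =>
    intro k plen pal hk
    have hempty : ((cs.take j).reverse).drop k = [] ∨ (cs.drop (j+1)).drop k = [] := by
      rcases min_le_iff.mp (show min j (cs.length - j - 1) ≤ k by omega) with h | h
      · left; exact List.drop_eq_nil_iff.mpr (by rw [hLlen]; omega)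
      · right; exact List.drop_eq_nil_iff.mpr (by rw [hRlen]; omega)
    rcases hempty with h | h <;>
      simp [pvALoop, h, pvPrefLen_left_nil, pvPrefLen_right_nil]
  | succ fuel ih =>
    intro k plen pal hk
    rw [pvALoop]
    by_cases hg : 0 ≤ (j : Int) - ((k : Int) + 1) ∧ (j : Int) + ((k : Int) + 1) < (cs.length : Int)
    · have hkj : k < j := by omega
      have hkR : k < cs.length - (j+1) := by omega
      have hidx1 : (j : Int) - ((k : Int) + 1) = ((j - (k+1) : Nat) : Int) := by
        push_cast [Nat.cast_sub (by omega : k + 1 ≤ j)]; ring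
      have hidx2 : (j : Int) + ((k : Int) + 1) = ((j + (k+1) : Nat) : Int) := by push_cast; ring
      have hL : ((cs.take j).reverse).drop k =
          cs[j - (k+1)] :: ((cs.take j).reverse).drop (k+1) := by
        rw [List.drop_eq_getElem_cons (show k < ((cs.take j).reverse).length by rw [hLlen]; omega)]
        congr 1
        rw [List.getElem_reverse, List.getElem_take]
        congr 1
        simp [Nat.min_eq_left (le_of_lt hj)]
        omega
      have hR : (cs.drop (j+1)).drop k = cs[j + (k+1)] :: (cs.drop (j+1)).drop (k+1) := by
        rw [List.drop_eq_getElem_cons (by omega : k < (cs.drop (j+1)).length)]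
        congr 1
        rw [List.getElem_drop]
        congr 1; omega
      rw [if_pos hg, hidx1, hidx2, PySem.List.pyGet?_natCast, PySem.List.pyGet?_natCast]
      rw [List.getElem?_eq_getElem (by omega), List.getElem?_eq_getElem (by omega)]
      dsimp only
      by_cases heq : cs[j - (k+1)] = cs[j + (k+1)]
      · rw [if_pos heq]
        have hcast : ((k : Int) + 1) + 1 = ((k + 1 : Nat) : Int) + 1 := by push_cast; ring
        rw [hcast, ih (k+1) (plen + 2) (cs[j - (k+1)] :: pal ++ [cs[j + (k+1)]]) (by omega)]
        rw [hL, hR]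
        simp only [pvPrefLen, if_pos heq, Prod.mk.injEq]
        constructor
        · push_cast; ring
        · simp [heq, List.take_succ_cons, List.reverse_cons, List.append_assoc]
      · rw [if_neg heq, hL, hR]
        simp only [pvPrefLen, if_neg heq]
        simp
    · rw [if_neg hg]
      have hempty : ((cs.take j).reverse).drop k = [] ∨ (cs.drop (j+1)).drop k = [] := by
        by_cases h1 : k < j
        · right; exact List.drop_eq_nil_iff.mpr (by omega)
        · left; exact List.drop_eq_nil_iff.mpr (by omega)
      rcases hempty with h | h <;>
        simp [h, pvPrefLen_left_nil, pvPrefLen_right_nil]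

-- when start_index < 0, A's loop guard fails immediately
lemma pvALoop_neg (cs : List Char) (si : Int) (hsi : si < 0) :
    ∀ (fuel : Nat) (plen : Int) (pal : List Char), pvALoop cs si fuel 1 plen pal = (plen, pal) := by
  intro fuel plen pal
  cases fuel with
  | zero => rfl
  | succ fuel =>
    rw [pvALoop]
    have : ¬ (0 ≤ si - 1 ∧ si + 1 < (cs.length : Int)) := by omega
    rw [if_neg this]

-- ===== VERDICT (by name: the statement is the Claim_ definition above) =====
theorem find_longest_odd_length_palindrome_spec : Claim_equal_find_longest_odd_length_palindrome := by
  intro s si _ hpre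
  obtain ⟨h1, h2⟩ := hpre
  unfold Spec_find_longest_odd_length_palindrome
  obtain ⟨c, hc⟩ : ∃ c, PySem.List.pyGet? s.toList si = some c := by
    cases h : PySem.List.pyGet? s.toList si with
    | none =>
      exact absurd ((PySem.List.pyGet?_eq_none_iff s.toList si).mp h)
        (not_not_intro (by unfold PySem.Raise.InRange; omega))
    | some c => exact ⟨c, rfl⟩
  simp only [find_longest_odd_length_palindrome, find_longest_odd_length_palindrome_alt, hc]
  by_cases hneg : si < 0
  · -- negative index: A's loop never runs; B's left arm is empty
    rw [pvALoop_neg s.toList si hneg]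
    have hleft : pvBLeft s.toList (si - 1) = [] := by
      rw [pvBLeft, dif_neg (show ¬ (0 : Int) ≤ si - 1 by omega)]
    rw [hleft]
    simp [pvPrefLen_left_nil]
  · -- nonnegative index: apply the loop characterisation at k = 0, fuel = length
    have hj0 : 0 ≤ si := by omega
    have hsij : si = (si.toNat : Int) := (Int.toNat_of_nonneg hj0).symm
    have hjlt : si.toNat < s.toList.length := by omega
    have hmain := pvALoop_eq s.toList si.toNat hjlt s.toList.length 0 1 [c] (by omega)
    rw [show ((0 : Nat) : Int) + 1 = (1 : Int) by norm_num] at hmain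
    rw [hsij, hmain]
    have hleft : pvBLeft s.toList ((si.toNat : Int) - 1) = (s.toList.take si.toNat).reverse :=
      pvBLeft_eq s.toList si.toNat (le_of_lt hjlt)
    have hright : pvBRight s.toList ((si.toNat : Int) + 1) = s.toList.drop (si.toNat + 1) := by
      rw [show (si.toNat : Int) + 1 = ((si.toNat + 1 : Nat) : Int) by push_cast; ring,
          pvBRight_eq s.toList s.toList.length (si.toNat + 1) (by omega)]
    simp only [List.drop_zero, hleft, hright, Prod.mk.injEq]
    constructor
    · ring
    · simp
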